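-- pv_equiv track=rewrite | github.com/marcosseunick/exercicios_faculdade_python | lista_funcoes/ex012.py | quadrado
-- ===== SOURCE A (Python) =====
-- def quadrado(base, altura):
--     linha = ""
--     for i in range(altura):
--         if i == 0:
--             linha += "* " * base + "\n"
--         elif i == altura - 1:
--             linha += "* " * base + "\n"
--         else:
--             linha += "*" + " " * ((base - 2) * 2 + 1) + "*" + "\n"
--     return linha
-- ===== SOURCE B (Python) =====
-- def quadrado(base, altura):
--     if altura <= 0:
--         return ""
--     full = "* " * base + "\n"
--     if altura == 1:
--         return full
--     hollow = "*" + " " * ((base - 2) * 2 + 1) + "*\n"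
--     return full + hollow * (altura - 2) + full
-- ===== Notes on version B (the rewrite author's own statement) =====
-- stated objective: simpler
-- what changed: Replaces A's per-row loop with index branching by a one-shot assembly: build the full and hollow row strings once and return full + hollow*(altura-2) + full.
import Mathlib
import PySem

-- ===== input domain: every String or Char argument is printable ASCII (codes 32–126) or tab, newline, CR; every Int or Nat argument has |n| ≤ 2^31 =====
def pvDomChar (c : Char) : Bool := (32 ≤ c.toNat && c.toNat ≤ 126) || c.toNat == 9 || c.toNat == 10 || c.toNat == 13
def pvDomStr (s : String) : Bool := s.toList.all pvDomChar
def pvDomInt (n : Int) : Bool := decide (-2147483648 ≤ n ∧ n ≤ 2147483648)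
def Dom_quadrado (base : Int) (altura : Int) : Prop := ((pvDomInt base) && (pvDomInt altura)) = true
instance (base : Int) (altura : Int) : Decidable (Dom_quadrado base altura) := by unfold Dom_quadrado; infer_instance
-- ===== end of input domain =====

-- B replaces A's per-row loop with a one-shot assembly full ++ hollow*(altura-2) ++ full (objective: simpler).

-- ===== PORT A =====
-- A: accumulate row by row over range(altura), branching on the row index.
def quadrado (base : Int) (altura : Int) : String :=
  String.ofList <|
    (PySem.List.pyRange 0 altura 1).foldl
      (fun linha i =>
        if i = 0 then
          linha ++ (PySem.List.pyRepeat ['*', ' '] base ++ ['\n'])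
        else if i = altura - 1 then
          linha ++ (PySem.List.pyRepeat ['*', ' '] base ++ ['\n'])
        else
          linha ++ (['*'] ++ PySem.List.pyRepeat [' '] ((base - 2) * 2 + 1) ++ ['*'] ++ ['\n']))
      []

-- ===== PORT B =====
-- B: build the two row strings once and multiply.
def quadrado_alt (base : Int) (altura : Int) : String :=
  if altura ≤ 0 then ""
  else
    let full := PySem.List.pyRepeat ['*', ' '] base ++ ['\n']
    if altura = 1 then String.ofList full
    else
      let hollow := ['*'] ++ PySem.List.pyRepeat [' '] ((base - 2) * 2 + 1) ++ ['*', '\n']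
      String.ofList (full ++ PySem.List.pyRepeat hollow (altura - 2) ++ full)

-- ===== PRECONDITION & SPEC =====
def Spec_quadrado (base : Int) (altura : Int) (out : String) : Prop := out = quadrado_alt base altura
instance (base : Int) (altura : Int) (out : String) : Decidable (Spec_quadrado base altura out) := by unfold Spec_quadrado; infer_instance

-- ===== CLAIM (what is proved, stated in full; the proofs are below) =====
def Claim_equal_quadrado : Prop := ∀ (base : Int) (altura : Int), Dom_quadrado base altura → Spec_quadrado base altura (quadrado base altura)

-- ===== LEMMAS AND PROOFS =====

theorem quadrado_eq (base altura : Int) :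
    quadrado base altura = quadrado_alt base altura := by
  unfold quadrado quadrado_alt
  have hfun : (fun (linha : List Char) (i : Int) =>
        if i = 0 then linha ++ (PySem.List.pyRepeat ['*', ' '] base ++ ['\n'])
        else if i = altura - 1 then linha ++ (PySem.List.pyRepeat ['*', ' '] base ++ ['\n'])
        else linha ++ (['*'] ++ PySem.List.pyRepeat [' '] ((base - 2) * 2 + 1) ++ ['*'] ++ ['\n'])) =
      (fun linha i => linha ++
        (if i = 0 then PySem.List.pyRepeat ['*', ' '] base ++ ['\n']
         else if i = altura - 1 then PySem.List.pyRepeat ['*', ' '] base ++ ['\n']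
         else ['*'] ++ PySem.List.pyRepeat [' '] ((base - 2) * 2 + 1) ++ ['*'] ++ ['\n'])) := by
    funext linha i
    by_cases hi0 : i = 0
    · simp [hi0]
    · by_cases hi1 : i = altura - 1 <;> simp [hi0, hi1]
  rw [hfun, PySem.List.foldl_append_eq_flatMap]
  by_cases h0 : altura ≤ 0
  · rw [PySem.List.pyRange_one_eq_nil (by omega)]
    simp [h0]
  · by_cases h1 : altura = 1
    · subst h1
      rw [PySem.List.pyRange_one_cons (by omega), PySem.List.pyRange_one_eq_nil (by omega)]
      simp
    · have h2 : 2 ≤ altura := by omega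
      rw [PySem.List.pyRange_one_append 0 1 altura (by omega) (by omega),
          PySem.List.pyRange_one_append 1 (altura - 1) altura (by omega) (by omega),
          PySem.List.pyRange_one_cons (show (0:Int) < 1 by omega),
          PySem.List.pyRange_one_eq_nil (show (1:Int) ≤ 0 + 1 by omega),
          PySem.List.pyRange_one_cons (show altura - 1 < altura by omega),
          PySem.List.pyRange_one_eq_nil (show altura ≤ altura - 1 + 1 by omega)]
      simp only [List.flatMap_append, List.flatMap_cons, List.flatMap_nil, List.append_nil,
          List.nil_append]
      have hmid : (PySem.List.pyRange 1 (altura - 1) 1).flatMap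
          (fun i =>
            if i = 0 then PySem.List.pyRepeat ['*', ' '] base ++ ['\n']
            else if i = altura - 1 then PySem.List.pyRepeat ['*', ' '] base ++ ['\n']
            else ['*'] ++ PySem.List.pyRepeat [' '] ((base - 2) * 2 + 1) ++ ['*'] ++ ['\n']) =
          PySem.List.pyRepeat
            (['*'] ++ PySem.List.pyRepeat [' '] ((base - 2) * 2 + 1) ++ ['*', '\n'])
            (altura - 2) := by
        unfold List.flatMap
        rw [List.map_congr_left (g := fun _ =>
              ['*'] ++ PySem.List.pyRepeat [' '] ((base - 2) * 2 + 1) ++ ['*', '\n'])]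
        · rw [List.map_const', PySem.List.length_pyRange_one]
          unfold PySem.List.pyRepeat
          have : (altura - 1 - 1).toNat = (altura - 2).toNat := by omega
          rw [this]
        · intro i hi
          rw [PySem.List.mem_pyRange_one] at hi
          have hne0 : ¬ i = 0 := by omega
          have hne1 : ¬ i = altura - 1 := by omega
          simp [hne0, hne1]
      have halt0 : ¬ altura ≤ 0 := by omega
      have hne1' : (0 : Int) ≠ altura - 1 := by omega
      have hne1'' : altura - 1 ≠ 0 := by omega
      simp only [hmid]
      simp [halt0, h1, hne1', hne1'']

-- ===== VERDICT (by name: the statement is the Claim_ definition above) =====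
theorem quadrado_spec : Claim_equal_quadrado := by
  intro base altura _
  exact quadrado_eq base altura
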